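-- pv_equiv track=rewrite | github.com/Denisov21/Songpressplusplus | src/songpressPlusPlus/SyntaxChecker.py | _parse_chord_semitones
-- ===== SOURCE A (Python) =====
-- _IT_NOTES = {
--     'do': 0,  'do#': 1,  'dob': 11,
--     're': 2,  're#': 3,  'reb': 1,
--     'mi': 4,  'mi#': 5,  'mib': 3,
--     'fa': 5,  'fa#': 6,  'fab': 4,
--     'sol': 7, 'sol#': 8, 'solb': 6,
--     'la': 9,  'la#': 10, 'lab': 8,
--     'si': 11, 'si#': 0,  'sib': 10,
-- }
--
-- _EN_NOTES = {
--     'c': 0,  'c#': 1,  'cb': 11,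
--     'd': 2,  'd#': 3,  'db': 1,
--     'e': 4,  'e#': 5,  'eb': 3,
--     'f': 5,  'f#': 6,  'fb': 4,
--     'g': 7,  'g#': 8,  'gb': 6,
--     'a': 9,  'a#': 10, 'ab': 8,
--     'b': 11, 'b#': 0,  'bb': 10,
--     'h': 11,
-- }
--
-- _CHORD_INTERVALS = [
--     ('maj7',  [0, 4, 7, 11]),
--     ('maj',   [0, 4, 7]),
--     ('m7b5',  [0, 3, 6, 10]),
--     ('m7',    [0, 3, 7, 10]),
--     ('min',   [0, 3, 7]),
--     ('m',     [0, 3, 7]),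
--     ('dim7',  [0, 3, 6, 9]),
--     ('dim',   [0, 3, 6]),
--     ('aug',   [0, 4, 8]),
--     ('sus4',  [0, 5, 7]),
--     ('sus2',  [0, 2, 7]),
--     ('7',     [0, 4, 7, 10]),
--     ('5',     [0, 7]),
--     ('-',     [0, 3, 7]),
--     ('',      [0, 4, 7]),
-- ]
--
-- def _parse_chord_semitones(chord_str: str):
--     """
--     Parsa il nome di un accordo e restituisce il set di semitoni (0-11)
--     che ne fanno parte, oppure None se l'accordo non è riconosciuto.
--     """
--     s = chord_str.strip()
--     sl = s.lower()
--     root = None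
--     rest = ''
--
--     # Prova notazione italiana (ordine per lunghezza decrescente)
--     for name in sorted(_IT_NOTES, key=len, reverse=True):
--         if sl.startswith(name):
--             root = _IT_NOTES[name]
--             rest = s[len(name):]
--             break
--
--     # Prova notazione inglese
--     if root is None:
--         for name in sorted(_EN_NOTES, key=len, reverse=True):
--             if sl.startswith(name):
--                 root = _EN_NOTES[name]
--                 rest = s[len(name):]
--                 break
--
--     if root is None:
--         return None
--
--     # Ignora il basso dopo /
--     rest = rest.split('/')[0].strip()
--
--     # Trova gli intervalli del tipo di accordo
--     intervals = [0, 4, 7]   # default maggiore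
--     for suffix, ivs in _CHORD_INTERVALS:
--         if rest.lower().startswith(suffix.lower()):
--             intervals = ivs
--             break
--
--     return {(root + i) % 12 for i in intervals}
-- ===== SOURCE B (Python) =====
-- _CHORD_INTERVALS = [
--     ('maj7',  [0, 4, 7, 11]),
--     ('maj',   [0, 4, 7]),
--     ('m7b5',  [0, 3, 6, 10]),
--     ('m7',    [0, 3, 7, 10]),
--     ('min',   [0, 3, 7]),
--     ('m',     [0, 3, 7]),
--     ('dim7',  [0, 3, 6, 9]),
--     ('dim',   [0, 3, 6]),
--     ('aug',   [0, 4, 8]),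
--     ('sus4',  [0, 5, 7]),
--     ('sus2',  [0, 2, 7]),
--     ('7',     [0, 4, 7, 10]),
--     ('5',     [0, 7]),
--     ('-',     [0, 3, 7]),
--     ('',      [0, 4, 7]),
-- ]
--
--
-- def _accidental(base, sl, L):
--     """Optional accidental after the note name at position L: arithmetic, no table."""
--     nxt = sl[L:L + 1]
--     if nxt == '#':
--         return (base + 1) % 12, L + 1
--     if nxt == 'b':
--         return (base - 1) % 12, L + 1
--     return base, L
--
--
-- def _root_it(sl):
--     """Italian note name at the start of sl, parsed character by character."""
--     c2 = sl[:2]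
--     if c2 == 'so' and sl[2:3] == 'l':
--         return _accidental(7, sl, 3)
--     if c2 == 'do':
--         return _accidental(0, sl, 2)
--     if c2 == 're':
--         return _accidental(2, sl, 2)
--     if c2 == 'mi':
--         return _accidental(4, sl, 2)
--     if c2 == 'fa':
--         return _accidental(5, sl, 2)
--     if c2 == 'la':
--         return _accidental(9, sl, 2)
--     if c2 == 'si':
--         return _accidental(11, sl, 2)
--     return None
--
--
-- def _root_en(sl):
--     """English note letter at the start of sl ('h' takes no accidental)."""
--     c1 = sl[:1]
--     if c1 == 'h':
--         return 11, 1
--     if c1 == 'c':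
--         return _accidental(0, sl, 1)
--     if c1 == 'd':
--         return _accidental(2, sl, 1)
--     if c1 == 'e':
--         return _accidental(4, sl, 1)
--     if c1 == 'f':
--         return _accidental(5, sl, 1)
--     if c1 == 'g':
--         return _accidental(7, sl, 1)
--     if c1 == 'a':
--         return _accidental(9, sl, 1)
--     if c1 == 'b':
--         return _accidental(11, sl, 1)
--     return None
--
--
-- def _intervals(rl):
--     """Chord-quality suffix as a decision tree over the first characters of rl."""
--     if rl.startswith('m'):
--         if rl.startswith('maj'):
--             return [0, 4, 7, 11] if rl.startswith('maj7') else [0, 4, 7]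
--         if rl.startswith('m7'):
--             return [0, 3, 6, 10] if rl.startswith('m7b5') else [0, 3, 7, 10]
--         return [0, 3, 7]
--     if rl.startswith('dim'):
--         return [0, 3, 6, 9] if rl.startswith('dim7') else [0, 3, 6]
--     if rl.startswith('aug'):
--         return [0, 4, 8]
--     if rl.startswith('sus4'):
--         return [0, 5, 7]
--     if rl.startswith('sus2'):
--         return [0, 2, 7]
--     if rl.startswith('7'):
--         return [0, 4, 7, 10]
--     if rl.startswith('5'):
--         return [0, 7]
--     if rl.startswith('-'):
--         return [0, 3, 7]
--     return [0, 4, 7]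
--
--
-- def _parse_chord_semitones(chord_str: str):
--     s = chord_str.strip()
--     sl = s.lower()
--     hit = _root_it(sl)
--     if hit is None:
--         hit = _root_en(sl)
--     if hit is None:
--         return None
--     root, L = hit
--     rest = s[L:].split('/')[0].strip()
--     return {(root + i) % 12 for i in _intervals(rest.lower())}
-- ===== Notes on version B (the rewrite author's own statement) =====
-- stated objective: alternative
-- what changed: Replaces A's table-driven root lookup (two per-call sorted-key startswith scans over the 43-entry note dicts) by a table-free character-level parser: match the bare note name (digraph or letter) by direct character comparisons, then handle an optional sharp/flat accidental arithmetically as (base plus/minus 1) mod 12; the suffix priority list is replaced by a prefix decision tree.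
import Mathlib
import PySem

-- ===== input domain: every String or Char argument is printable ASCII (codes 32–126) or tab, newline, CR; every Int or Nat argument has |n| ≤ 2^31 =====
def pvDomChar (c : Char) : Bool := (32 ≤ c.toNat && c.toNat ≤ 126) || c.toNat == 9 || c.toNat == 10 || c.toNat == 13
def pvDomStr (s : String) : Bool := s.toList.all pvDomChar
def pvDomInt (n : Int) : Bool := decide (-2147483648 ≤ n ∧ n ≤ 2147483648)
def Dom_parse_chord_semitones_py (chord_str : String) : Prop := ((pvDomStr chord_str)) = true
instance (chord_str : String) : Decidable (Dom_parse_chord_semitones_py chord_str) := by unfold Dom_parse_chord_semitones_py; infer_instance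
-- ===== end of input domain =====

-- B replaces A's table-driven root lookup (two per-call sorted-key startswith scans over the
-- note dicts) by a table-free character-level parser: note name by char comparisons, an optional
-- sharp/flat accidental handled arithmetically as (base plus/minus 1) mod 12, and the suffix
-- priority list by a prefix decision tree; objective: alternative (same cost class, no tables).

-- ===== PORT A =====
-- the module-level tables (dict → PySem.Dict on List Char keys)
def pvItPairs : List (List Char × Int) :=
  [("do".toList, 0), ("do#".toList, 1), ("dob".toList, 11),
   ("re".toList, 2), ("re#".toList, 3), ("reb".toList, 1),
   ("mi".toList, 4), ("mi#".toList, 5), ("mib".toList, 3),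
   ("fa".toList, 5), ("fa#".toList, 6), ("fab".toList, 4),
   ("sol".toList, 7), ("sol#".toList, 8), ("solb".toList, 6),
   ("la".toList, 9), ("la#".toList, 10), ("lab".toList, 8),
   ("si".toList, 11), ("si#".toList, 0), ("sib".toList, 10)]

def pvEnPairs : List (List Char × Int) :=
  [("c".toList, 0), ("c#".toList, 1), ("cb".toList, 11),
   ("d".toList, 2), ("d#".toList, 3), ("db".toList, 1),
   ("e".toList, 4), ("e#".toList, 5), ("eb".toList, 3),
   ("f".toList, 5), ("f#".toList, 6), ("fb".toList, 4),
   ("g".toList, 7), ("g#".toList, 8), ("gb".toList, 6),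
   ("a".toList, 9), ("a#".toList, 10), ("ab".toList, 8),
   ("b".toList, 11), ("b#".toList, 0), ("bb".toList, 10),
   ("h".toList, 11)]

def pvItNotes : PySem.Dict (List Char) Int := PySem.Dict.ofList pvItPairs
def pvEnNotes : PySem.Dict (List Char) Int := PySem.Dict.ofList pvEnPairs

def pvChordIntervals : List (List Char × List Int) :=
  [("maj7".toList, [0, 4, 7, 11]),
   ("maj".toList,  [0, 4, 7]),
   ("m7b5".toList, [0, 3, 6, 10]),
   ("m7".toList,   [0, 3, 7, 10]),
   ("min".toList,  [0, 3, 7]),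
   ("m".toList,    [0, 3, 7]),
   ("dim7".toList, [0, 3, 6, 9]),
   ("dim".toList,  [0, 3, 6]),
   ("aug".toList,  [0, 4, 8]),
   ("sus4".toList, [0, 5, 7]),
   ("sus2".toList, [0, 2, 7]),
   ("7".toList,    [0, 4, 7, 10]),
   ("5".toList,    [0, 7]),
   ("-".toList,    [0, 3, 7]),
   ("".toList,     [0, 4, 7])]

-- A's code after 'if root is None: return None' (root and rest already set).
-- rest.split('/')[0] : splitOn always returns a nonempty list, so [0] is its head;
-- the intervals loop with break = find? with A's default [0,4,7] when no suffix matched;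
-- the set comprehension builds a Python set in iteration order = PySem.Set.ofList of the map.
def pvA_tail (root : Int) (rest : List Char) : Option (List Int) :=
  let rest1 := PySem.Chars.strip ((PySem.Chars.splitOn rest ['/']).headD [])
  let intervals :=
    match pvChordIntervals.find?
        (fun p => PySem.Chars.startswith (PySem.Chars.lower rest1) (PySem.Chars.lower p.1)) with
    | some p => p.2
    | none => [0, 4, 7]
  some (PySem.Set.ofList (intervals.map (fun i => PySem.Int.mod (root + i) 12)))

-- A: two 'for name in sorted(NOTES, key=len, reverse=True): if sl.startswith(name): … break'
-- loops (find? over the sorted key list); _XX_NOTES[name] with name a present key = getD name 0;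
-- s[len(name):] = slice from len(name).
def parse_chord_semitones_py (chord_str : String) : Option (List Int) :=
  let s := PySem.Chars.strip chord_str.toList
  let sl := PySem.Chars.lower s
  match (PySem.List.sorted pvItNotes.keys (fun k => k.length) true).find?
      (fun name => PySem.Chars.startswith sl name) with
  | some name => pvA_tail (pvItNotes.getD name 0) (PySem.List.slice s (some (name.length : Int)) none)
  | none =>
    match (PySem.List.sorted pvEnNotes.keys (fun k => k.length) true).find?
        (fun name => PySem.Chars.startswith sl name) with
    | some name => pvA_tail (pvEnNotes.getD name 0) (PySem.List.slice s (some (name.length : Int)) none)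
    | none => none

-- ===== PORT B =====
-- _accidental(base, sl, L): optional sharp or flat after the note name, arithmetic on the base value
def pvAccidental (base : Int) (sl : List Char) (L : Int) : Int × Int :=
  let nxt := PySem.List.slice sl (some L) (some (L + 1))
  if nxt = ['#'] then (PySem.Int.mod (base + 1) 12, L + 1)
  else if nxt = ['b'] then (PySem.Int.mod (base - 1) 12, L + 1)
  else (base, L)

-- _root_it(sl): Italian note name, char by char (if-chain of Source B, in order)
def pvRootIt (sl : List Char) : Option (Int × Int) :=
  let c2 := PySem.List.slice sl none (some 2)
  if c2 = ['s', 'o'] ∧ PySem.List.slice sl (some 2) (some 3) = ['l'] then some (pvAccidental 7 sl 3)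
  else if c2 = ['d', 'o'] then some (pvAccidental 0 sl 2)
  else if c2 = ['r', 'e'] then some (pvAccidental 2 sl 2)
  else if c2 = ['m', 'i'] then some (pvAccidental 4 sl 2)
  else if c2 = ['f', 'a'] then some (pvAccidental 5 sl 2)
  else if c2 = ['l', 'a'] then some (pvAccidental 9 sl 2)
  else if c2 = ['s', 'i'] then some (pvAccidental 11 sl 2)
  else none

-- _root_en(sl): English note letter ('h' takes no accidental)
def pvRootEn (sl : List Char) : Option (Int × Int) :=
  let c1 := PySem.List.slice sl none (some 1)
  if c1 = ['h'] then some (11, 1)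
  else if c1 = ['c'] then some (pvAccidental 0 sl 1)
  else if c1 = ['d'] then some (pvAccidental 2 sl 1)
  else if c1 = ['e'] then some (pvAccidental 4 sl 1)
  else if c1 = ['f'] then some (pvAccidental 5 sl 1)
  else if c1 = ['g'] then some (pvAccidental 7 sl 1)
  else if c1 = ['a'] then some (pvAccidental 9 sl 1)
  else if c1 = ['b'] then some (pvAccidental 11 sl 1)
  else none

-- _intervals(rl): chord-quality suffix as a prefix decision tree
def pvIntervalsB (rl : List Char) : List Int :=
  if PySem.Chars.startswith rl ['m'] then
    if PySem.Chars.startswith rl "maj".toList then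
      if PySem.Chars.startswith rl "maj7".toList then [0, 4, 7, 11] else [0, 4, 7]
    else if PySem.Chars.startswith rl "m7".toList then
      if PySem.Chars.startswith rl "m7b5".toList then [0, 3, 6, 10] else [0, 3, 7, 10]
    else [0, 3, 7]
  else if PySem.Chars.startswith rl "dim".toList then
    if PySem.Chars.startswith rl "dim7".toList then [0, 3, 6, 9] else [0, 3, 6]
  else if PySem.Chars.startswith rl "aug".toList then [0, 4, 8]
  else if PySem.Chars.startswith rl "sus4".toList then [0, 5, 7]
  else if PySem.Chars.startswith rl "sus2".toList then [0, 2, 7]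
  else if PySem.Chars.startswith rl "7".toList then [0, 4, 7, 10]
  else if PySem.Chars.startswith rl "5".toList then [0, 7]
  else if PySem.Chars.startswith rl "-".toList then [0, 3, 7]
  else [0, 4, 7]

def parse_chord_semitones_py_alt (chord_str : String) : Option (List Int) :=
  let s := PySem.Chars.strip chord_str.toList
  let sl := PySem.Chars.lower s
  let hit := match pvRootIt sl with
    | some h => some h
    | none => pvRootEn sl
  match hit with
  | some (root, L) =>
    let rest := PySem.Chars.strip ((PySem.Chars.splitOn (PySem.List.slice s (some L) none) ['/']).headD [])
    some (PySem.Set.ofList ((pvIntervalsB (PySem.Chars.lower rest)).map (fun i => PySem.Int.mod (root + i) 12)))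
  | none => none

-- ===== PRECONDITION & SPEC =====
def Spec_parse_chord_semitones_py (chord_str : String) (out : Option (List Int)) : Prop := out = parse_chord_semitones_py_alt chord_str
instance (chord_str : String) (out : Option (List Int)) : Decidable (Spec_parse_chord_semitones_py chord_str out) := by unfold Spec_parse_chord_semitones_py; infer_instance

-- ===== CLAIM (what is proved, stated in full; the proofs are below) =====
def Claim_equal_parse_chord_semitones_py : Prop := ∀ (chord_str : String), Dom_parse_chord_semitones_py chord_str → Spec_parse_chord_semitones_py chord_str (parse_chord_semitones_py chord_str)

-- ===== LEMMAS AND PROOFS =====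

-- note keys grouped by length, in A's sorted order
def pvG4 : List (List Char) := ["sol#".toList, "solb".toList]
def pvG3 : List (List Char) :=
  ["do#".toList, "dob".toList, "re#".toList, "reb".toList, "mi#".toList, "mib".toList,
   "fa#".toList, "fab".toList, "sol".toList, "la#".toList, "lab".toList, "si#".toList, "sib".toList]
def pvG2it : List (List Char) := ["do".toList, "re".toList, "mi".toList, "fa".toList, "la".toList, "si".toList]
def pvG2en : List (List Char) :=
  ["c#".toList, "cb".toList, "d#".toList, "db".toList, "e#".toList, "eb".toList, "f#".toList,
   "fb".toList, "g#".toList, "gb".toList, "a#".toList, "ab".toList, "b#".toList, "bb".toList]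
def pvG1 : List (List Char) :=
  ["c".toList, "d".toList, "e".toList, "f".toList, "g".toList, "a".toList, "b".toList, "h".toList]

lemma pv_find_group (sl : List Char) (L : Nat) (ks : List (List Char))
    (hL : ∀ k ∈ ks, k.length = L) :
    ks.find? (fun n => PySem.Chars.startswith sl n)
      = if sl.take L ∈ ks then some (sl.take L) else none := by
  induction ks with
  | nil => simp
  | cons k ks ih =>
    have hk : k.length = L := hL k (by simp)
    have hrest : ∀ k' ∈ ks, k'.length = L := fun k' h => hL k' (by simp [h])
    by_cases hs : PySem.Chars.startswith sl k = true
    · have hkt : k = sl.take L := by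
        have h1 := (PySem.Chars.startswith_iff sl k).mp hs
        rw [List.prefix_iff_eq_take] at h1
        rw [← hk]; exact h1
      simp [hs, ← hkt]
    · have hne : sl.take L ≠ k := fun h =>
        hs (by rw [PySem.Chars.startswith_iff, ← h]; exact List.take_prefix L sl)
      rw [List.find?_cons_of_neg (by simpa using hs), ih hrest]
      simp [List.mem_cons, hne]

set_option maxRecDepth 16384 in
lemma pv_itFind (sl : List Char) :
    (PySem.List.sorted pvItNotes.keys (fun k => k.length) true).find?
        (fun name => PySem.Chars.startswith sl name)
      = if sl.take 4 ∈ pvG4 then some (sl.take 4)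
        else if sl.take 3 ∈ pvG3 then some (sl.take 3)
        else if sl.take 2 ∈ pvG2it then some (sl.take 2)
        else none := by
  rw [show PySem.List.sorted pvItNotes.keys (fun k => k.length) true = pvG4 ++ (pvG3 ++ pvG2it) from by decide]
  rw [List.find?_append, List.find?_append,
      pv_find_group sl 4 pvG4 (by decide), pv_find_group sl 3 pvG3 (by decide),
      pv_find_group sl 2 pvG2it (by decide)]
  split_ifs <;> simp [Option.or]

set_option maxRecDepth 16384 in
lemma pv_enFind (sl : List Char) :
    (PySem.List.sorted pvEnNotes.keys (fun k => k.length) true).find?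
        (fun name => PySem.Chars.startswith sl name)
      = if sl.take 2 ∈ pvG2en then some (sl.take 2)
        else if sl.take 1 ∈ pvG1 then some (sl.take 1)
        else none := by
  rw [show PySem.List.sorted pvEnNotes.keys (fun k => k.length) true = pvG2en ++ pvG1 from by decide]
  rw [List.find?_append,
      pv_find_group sl 2 pvG2en (by decide), pv_find_group sl 1 pvG1 (by decide)]
  split_ifs <;> simp [Option.or]

lemma pv_sw_mono (rl l1 l2 : List Char) (h : PySem.Chars.startswith rl l1 = true)
    (hp : l2 <+: l1) : PySem.Chars.startswith rl l2 = true := by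
  rw [PySem.Chars.startswith_iff] at h ⊢
  exact hp.trans h

lemma pv_intervals_eq (rl : List Char) :
    (match pvChordIntervals.find? (fun p => PySem.Chars.startswith rl p.1) with
     | some p => p.2
     | none => [0, 4, 7]) = pvIntervalsB rl := by
  have sw := pv_sw_mono rl
  unfold pvIntervalsB
  simp only [pvChordIntervals, List.find?]
  by_cases h1 : PySem.Chars.startswith rl ['m', 'a', 'j', '7'] = true
  · simp [h1, sw ['m', 'a', 'j', '7'] ['m', 'a', 'j'] h1 (by decide), sw ['m', 'a', 'j', '7'] ['m'] h1 (by decide)]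
  ·
    by_cases h2 : PySem.Chars.startswith rl ['m', 'a', 'j'] = true
    · simp [h1, h2, sw ['m', 'a', 'j'] ['m'] h2 (by decide)]
    ·
      by_cases h3 : PySem.Chars.startswith rl ['m', '7', 'b', '5'] = true
      · simp [h1, h2, h3, sw ['m', '7', 'b', '5'] ['m', '7'] h3 (by decide), sw ['m', '7', 'b', '5'] ['m'] h3 (by decide)]
      ·
        by_cases h4 : PySem.Chars.startswith rl ['m', '7'] = true
        · simp [h1, h2, h3, h4, sw ['m', '7'] ['m'] h4 (by decide)]
        ·
          by_cases h5 : PySem.Chars.startswith rl ['m', 'i', 'n'] = true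
          · simp [h1, h2, h3, h4, h5, sw ['m', 'i', 'n'] ['m'] h5 (by decide)]
          ·
            by_cases h6 : PySem.Chars.startswith rl ['m'] = true
            · simp [h1, h2, h3, h4, h5, h6]
            ·
              by_cases h7 : PySem.Chars.startswith rl ['d', 'i', 'm', '7'] = true
              · simp [h1, h2, h3, h4, h5, h6, h7, sw ['d', 'i', 'm', '7'] ['d', 'i', 'm'] h7 (by decide)]
              ·
                by_cases h8 : PySem.Chars.startswith rl ['d', 'i', 'm'] = true
                · simp [h1, h2, h3, h4, h5, h6, h7, h8]
                ·
                  by_cases h9 : PySem.Chars.startswith rl ['a', 'u', 'g'] = true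
                  · simp [h1, h2, h3, h4, h5, h6, h7, h8, h9]
                  ·
                    by_cases h10 : PySem.Chars.startswith rl ['s', 'u', 's', '4'] = true
                    · simp [h1, h2, h3, h4, h5, h6, h7, h8, h9, h10]
                    ·
                      by_cases h11 : PySem.Chars.startswith rl ['s', 'u', 's', '2'] = true
                      · simp [h1, h2, h3, h4, h5, h6, h7, h8, h9, h10, h11]
                      ·
                        by_cases h12 : PySem.Chars.startswith rl ['7'] = true
                        · simp [h1, h2, h3, h4, h5, h6, h7, h8, h9, h10, h11, h12]
                        ·
                          by_cases h13 : PySem.Chars.startswith rl ['5'] = true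
                          · simp [h1, h2, h3, h4, h5, h6, h7, h8, h9, h10, h11, h12, h13]
                          ·
                            by_cases h14 : PySem.Chars.startswith rl ['-'] = true
                            · simp [h1, h2, h3, h4, h5, h6, h7, h8, h9, h10, h11, h12, h13, h14]
                            ·
                              simp [h1, h2, h3, h4, h5, h6, h7, h8, h9, h10, h11, h12, h13, h14,
                                show PySem.Chars.startswith rl [] = true from (PySem.Chars.startswith_iff rl []).mpr List.nil_prefix]

-- B's tail computation (what _parse_chord_semitones does after the root is found)
def pvB_tail (root : Int) (rest : List Char) : Option (List Int) :=
  some (PySem.Set.ofList ((pvIntervalsB (PySem.Chars.lower (PySem.Chars.strip ((PySem.Chars.splitOn rest ['/']).headD [])))).map (fun i => PySem.Int.mod (root + i) 12)))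

lemma pv_find?_congr {α : Type} (l : List α) (p q : α → Bool) (h : ∀ x ∈ l, p x = q x) :
    l.find? p = l.find? q := by
  induction l with
  | nil => rfl
  | cons a l ih =>
    rw [List.find?_cons, List.find?_cons, h a (List.mem_cons_self)]
    cases q a <;> simp [ih (fun x hx => h x (List.mem_cons_of_mem _ hx))]

-- the two tails agree (A's priority scan over _CHORD_INTERVALS = B's decision tree)
set_option maxRecDepth 16384 in
lemma pv_tail_eq (root : Int) (rest : List Char) : pvA_tail root rest = pvB_tail root rest := by
  unfold pvA_tail pvB_tail
  dsimp only
  have hlow : ∀ p ∈ pvChordIntervals, PySem.Chars.lower p.1 = p.1 := by decide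
  rw [pv_find?_congr pvChordIntervals _ _ (fun p hp => by rw [hlow p hp])]
  rw [pv_intervals_eq]

lemma pvAcc_norm (base : Int) (sl : List Char) (n : Nat) :
    pvAccidental base sl ((n : Nat) : Int) =
      (if (sl.drop n).take 1 = ['#'] then (PySem.Int.mod (base + 1) 12, ((n : Nat) : Int) + 1)
       else if (sl.drop n).take 1 = ['b'] then (PySem.Int.mod (base - 1) 12, ((n : Nat) : Int) + 1)
       else (base, ((n : Nat) : Int))) := by
  unfold pvAccidental
  rw [show ((n : Nat) : Int) + 1 = (((n + 1 : Nat) : Nat) : Int) from by push_cast; ring,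
      PySem.List.slice_natCast, show n + 1 - n = 1 from by omega]

lemma pvRootIt_norm (sl : List Char) :
    pvRootIt sl =
      (if sl.take 2 = ['s', 'o'] ∧ (sl.drop 2).take 1 = ['l'] then some (pvAccidental 7 sl 3)
       else if sl.take 2 = ['d', 'o'] then some (pvAccidental 0 sl 2)
       else if sl.take 2 = ['r', 'e'] then some (pvAccidental 2 sl 2)
       else if sl.take 2 = ['m', 'i'] then some (pvAccidental 4 sl 2)
       else if sl.take 2 = ['f', 'a'] then some (pvAccidental 5 sl 2)
       else if sl.take 2 = ['l', 'a'] then some (pvAccidental 9 sl 2)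
       else if sl.take 2 = ['s', 'i'] then some (pvAccidental 11 sl 2)
       else none) := by
  unfold pvRootIt
  rw [PySem.List.slice_to _ (by norm_num), PySem.List.slice_toNat _ (by norm_num) (by norm_num)]
  simp only [show Int.toNat 1 = 1 from rfl, show Int.toNat 2 = 2 from rfl,
    show Int.toNat 3 = 3 from rfl, show (3:Nat) - 2 = 1 from rfl]

lemma pvRootEn_norm (sl : List Char) :
    pvRootEn sl =
      (if sl.take 1 = ['h'] then some (11, 1)
       else if sl.take 1 = ['c'] then some (pvAccidental 0 sl 1)
       else if sl.take 1 = ['d'] then some (pvAccidental 2 sl 1)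
       else if sl.take 1 = ['e'] then some (pvAccidental 4 sl 1)
       else if sl.take 1 = ['f'] then some (pvAccidental 5 sl 1)
       else if sl.take 1 = ['g'] then some (pvAccidental 7 sl 1)
       else if sl.take 1 = ['a'] then some (pvAccidental 9 sl 1)
       else if sl.take 1 = ['b'] then some (pvAccidental 11 sl 1)
       else none) := by
  unfold pvRootEn
  rw [PySem.List.slice_to _ (by norm_num)]
  simp only [show Int.toNat 1 = 1 from rfl, show Int.toNat 2 = 2 from rfl,
    show Int.toNat 3 = 3 from rfl, show (3:Nat) - 2 = 1 from rfl]

lemma pvAcc3 (base : Int) (sl : List Char) :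
    pvAccidental base sl 3 =
      (if (sl.drop 3).take 1 = ['#'] then (PySem.Int.mod (base + 1) 12, 4)
       else if (sl.drop 3).take 1 = ['b'] then (PySem.Int.mod (base - 1) 12, 4)
       else (base, 3)) := by
  rw [show (3 : Int) = ((3 : Nat) : Int) from by norm_num, pvAcc_norm]
  norm_num

lemma pvAcc2 (base : Int) (sl : List Char) :
    pvAccidental base sl 2 =
      (if (sl.drop 2).take 1 = ['#'] then (PySem.Int.mod (base + 1) 12, 3)
       else if (sl.drop 2).take 1 = ['b'] then (PySem.Int.mod (base - 1) 12, 3)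
       else (base, 2)) := by
  rw [show (2 : Int) = ((2 : Nat) : Int) from by norm_num, pvAcc_norm]
  norm_num

lemma pvAcc1 (base : Int) (sl : List Char) :
    pvAccidental base sl 1 =
      (if (sl.drop 1).take 1 = ['#'] then (PySem.Int.mod (base + 1) 12, 2)
       else if (sl.drop 1).take 1 = ['b'] then (PySem.Int.mod (base - 1) 12, 2)
       else (base, 1)) := by
  rw [show (1 : Int) = ((1 : Nat) : Int) from by norm_num, pvAcc_norm]
  norm_num

set_option maxRecDepth 16384 in
lemma pv_root_main (s sl : List Char) :
    (match (PySem.List.sorted pvItNotes.keys (fun k => k.length) true).find?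
        (fun name => PySem.Chars.startswith sl name) with
     | some name => pvA_tail (pvItNotes.getD name 0) (PySem.List.slice s (some (name.length : Int)) none)
     | none =>
       match (PySem.List.sorted pvEnNotes.keys (fun k => k.length) true).find?
           (fun name => PySem.Chars.startswith sl name) with
       | some name => pvA_tail (pvEnNotes.getD name 0) (PySem.List.slice s (some (name.length : Int)) none)
       | none => none)
    = (match (match pvRootIt sl with | some h => some h | none => pvRootEn sl) with
       | some (root, L) => pvB_tail root (PySem.List.slice s (some L) none)
       | none => none) := by
  rw [pv_itFind, pv_enFind, pvRootIt_norm, pvRootEn_norm]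
  simp only [pvAcc3, pvAcc2, pvAcc1]
  rcases sl with _ | ⟨a, _ | ⟨b, t⟩⟩
  · simp [pvG4, pvG3, pvG2it, pvG2en, pvG1]
  · -- sl = [a]
    by_cases hSh : a = 'h'
    · subst hSh
      simp [pvG4, pvG3, pvG2it, pvG2en, pvG1, pv_tail_eq, show pvEnNotes.getD ['h'] 0 = 11 from by decide]
    · 
      by_cases hSc : a = 'c'
      · subst hSc
        simp [pvG4, pvG3, pvG2it, pvG2en, pvG1, pv_tail_eq, show pvEnNotes.getD ['c'] 0 = 0 from by decide]
      · 
        by_cases hSd : a = 'd'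
        · subst hSd
          simp [pvG4, pvG3, pvG2it, pvG2en, pvG1, pv_tail_eq, show pvEnNotes.getD ['d'] 0 = 2 from by decide]
        · 
          by_cases hSe : a = 'e'
          · subst hSe
            simp [pvG4, pvG3, pvG2it, pvG2en, pvG1, pv_tail_eq, show pvEnNotes.getD ['e'] 0 = 4 from by decide]
          · 
            by_cases hSf : a = 'f'
            · subst hSf
              simp [pvG4, pvG3, pvG2it, pvG2en, pvG1, pv_tail_eq, show pvEnNotes.getD ['f'] 0 = 5 from by decide]
            · 
              by_cases hSg : a = 'g'
              · subst hSg
                simp [pvG4, pvG3, pvG2it, pvG2en, pvG1, pv_tail_eq, show pvEnNotes.getD ['g'] 0 = 7 from by decide]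
              · 
                by_cases hSa : a = 'a'
                · subst hSa
                  simp [pvG4, pvG3, pvG2it, pvG2en, pvG1, pv_tail_eq, show pvEnNotes.getD ['a'] 0 = 9 from by decide]
                · 
                  by_cases hSb : a = 'b'
                  · subst hSb
                    simp [pvG4, pvG3, pvG2it, pvG2en, pvG1, pv_tail_eq, show pvEnNotes.getD ['b'] 0 = 11 from by decide]
                  · 
                    simp [pvG4, pvG3, pvG2it, pvG2en, pvG1, hSh, hSc, hSd, hSe, hSf, hSg, hSa, hSb]
  · -- sl = a :: b :: t
    by_cases hs : a = 's'
    · subst hs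
      by_cases hbo : b = 'o'
      · subst hbo
        rcases t with _ | ⟨c, t⟩
        · simp [pvG4, pvG3, pvG2it, pvG2en, pvG1]
        · by_cases hc : c = 'l'
          · subst hc
            by_cases hA1 : t.take 1 = ['#']
            · simp [pvG4, pvG3, pvG2it, pvG2en, pvG1, hA1, pv_tail_eq,
                show pvItNotes.getD ['s', 'o', 'l', '#'] 0 = PySem.Int.mod (7+1) 12 from by decide]
            · by_cases hA2 : t.take 1 = ['b']
              · simp [pvG4, pvG3, pvG2it, pvG2en, pvG1, hA1, hA2, pv_tail_eq,
                  show pvItNotes.getD ['s', 'o', 'l', 'b'] 0 = PySem.Int.mod (7-1) 12 from by decide]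
              · simp [pvG4, pvG3, pvG2it, pvG2en, pvG1, hA1, hA2, pv_tail_eq,
                  show pvItNotes.getD ['s', 'o', 'l'] 0 = 7 from by decide]
          · simp [pvG4, pvG3, pvG2it, pvG2en, pvG1, hc]
      · by_cases hbi : b = 'i'
        · subst hbi
          by_cases hA1 : t.take 1 = ['#']
          · simp [pvG4, pvG3, pvG2it, pvG2en, pvG1, hA1, pv_tail_eq,
              show pvItNotes.getD ['s', 'i', '#'] 0 = PySem.Int.mod (11+1) 12 from by decide]
          · by_cases hA2 : t.take 1 = ['b']
            · simp [pvG4, pvG3, pvG2it, pvG2en, pvG1, hA1, hA2, pv_tail_eq,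
                show pvItNotes.getD ['s', 'i', 'b'] 0 = PySem.Int.mod (11-1) 12 from by decide]
            · simp [pvG4, pvG3, pvG2it, pvG2en, pvG1, hA1, hA2, pv_tail_eq,
                show pvItNotes.getD ['s', 'i'] 0 = 11 from by decide]
        · simp [pvG4, pvG3, pvG2it, pvG2en, pvG1, hbo, hbi]
    · 
      by_cases hd : a = 'd'
      · subst hd
        by_cases hbd : b = 'o'
        · subst hbd
          by_cases hA1 : t.take 1 = ['#']
          · simp [pvG4, pvG3, pvG2it, pvG2en, pvG1, hA1, pv_tail_eq,
              show pvItNotes.getD ['d', 'o', '#'] 0 = PySem.Int.mod (0+1) 12 from by decide]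
          · by_cases hA2 : t.take 1 = ['b']
            · simp [pvG4, pvG3, pvG2it, pvG2en, pvG1, hA1, hA2, pv_tail_eq,
                show pvItNotes.getD ['d', 'o', 'b'] 0 = PySem.Int.mod (0-1) 12 from by decide]
            · simp [pvG4, pvG3, pvG2it, pvG2en, pvG1, hA1, hA2, pv_tail_eq,
                show pvItNotes.getD ['d', 'o'] 0 = 0 from by decide]
        · 
          by_cases hE1 : b = '#'
          · subst hE1
            simp [pvG4, pvG3, pvG2it, pvG2en, pvG1, hbd, pv_tail_eq,
              show pvEnNotes.getD ['d', '#'] 0 = PySem.Int.mod (2+1) 12 from by decide]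
          · by_cases hE2 : b = 'b'
            · subst hE2
              simp [pvG4, pvG3, pvG2it, pvG2en, pvG1, hbd, pv_tail_eq,
                show pvEnNotes.getD ['d', 'b'] 0 = PySem.Int.mod (2-1) 12 from by decide]
            · simp [pvG4, pvG3, pvG2it, pvG2en, pvG1, hbd, hE1, hE2, pv_tail_eq,
                show pvEnNotes.getD ['d'] 0 = 2 from by decide]
      · 
        by_cases hr : a = 'r'
        · subst hr
          by_cases hbr : b = 'e'
          · subst hbr
            by_cases hA1 : t.take 1 = ['#']
            · simp [pvG4, pvG3, pvG2it, pvG2en, pvG1, hA1, pv_tail_eq,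
                show pvItNotes.getD ['r', 'e', '#'] 0 = PySem.Int.mod (2+1) 12 from by decide]
            · by_cases hA2 : t.take 1 = ['b']
              · simp [pvG4, pvG3, pvG2it, pvG2en, pvG1, hA1, hA2, pv_tail_eq,
                  show pvItNotes.getD ['r', 'e', 'b'] 0 = PySem.Int.mod (2-1) 12 from by decide]
              · simp [pvG4, pvG3, pvG2it, pvG2en, pvG1, hA1, hA2, pv_tail_eq,
                  show pvItNotes.getD ['r', 'e'] 0 = 2 from by decide]
          · 
            simp [pvG4, pvG3, pvG2it, pvG2en, pvG1, hbr]
        · 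
          by_cases hm : a = 'm'
          · subst hm
            by_cases hbm : b = 'i'
            · subst hbm
              by_cases hA1 : t.take 1 = ['#']
              · simp [pvG4, pvG3, pvG2it, pvG2en, pvG1, hA1, pv_tail_eq,
                  show pvItNotes.getD ['m', 'i', '#'] 0 = PySem.Int.mod (4+1) 12 from by decide]
              · by_cases hA2 : t.take 1 = ['b']
                · simp [pvG4, pvG3, pvG2it, pvG2en, pvG1, hA1, hA2, pv_tail_eq,
                    show pvItNotes.getD ['m', 'i', 'b'] 0 = PySem.Int.mod (4-1) 12 from by decide]
                · simp [pvG4, pvG3, pvG2it, pvG2en, pvG1, hA1, hA2, pv_tail_eq,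
                    show pvItNotes.getD ['m', 'i'] 0 = 4 from by decide]
            · 
              simp [pvG4, pvG3, pvG2it, pvG2en, pvG1, hbm]
          · 
            by_cases hf : a = 'f'
            · subst hf
              by_cases hbf : b = 'a'
              · subst hbf
                by_cases hA1 : t.take 1 = ['#']
                · simp [pvG4, pvG3, pvG2it, pvG2en, pvG1, hA1, pv_tail_eq,
                    show pvItNotes.getD ['f', 'a', '#'] 0 = PySem.Int.mod (5+1) 12 from by decide]
                · by_cases hA2 : t.take 1 = ['b']
                  · simp [pvG4, pvG3, pvG2it, pvG2en, pvG1, hA1, hA2, pv_tail_eq,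
                      show pvItNotes.getD ['f', 'a', 'b'] 0 = PySem.Int.mod (5-1) 12 from by decide]
                  · simp [pvG4, pvG3, pvG2it, pvG2en, pvG1, hA1, hA2, pv_tail_eq,
                      show pvItNotes.getD ['f', 'a'] 0 = 5 from by decide]
              · 
                by_cases hE1 : b = '#'
                · subst hE1
                  simp [pvG4, pvG3, pvG2it, pvG2en, pvG1, hbf, pv_tail_eq,
                    show pvEnNotes.getD ['f', '#'] 0 = PySem.Int.mod (5+1) 12 from by decide]
                · by_cases hE2 : b = 'b'
                  · subst hE2
                    simp [pvG4, pvG3, pvG2it, pvG2en, pvG1, hbf, pv_tail_eq,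
                      show pvEnNotes.getD ['f', 'b'] 0 = PySem.Int.mod (5-1) 12 from by decide]
                  · simp [pvG4, pvG3, pvG2it, pvG2en, pvG1, hbf, hE1, hE2, pv_tail_eq,
                      show pvEnNotes.getD ['f'] 0 = 5 from by decide]
            · 
              by_cases hl : a = 'l'
              · subst hl
                by_cases hbl : b = 'a'
                · subst hbl
                  by_cases hA1 : t.take 1 = ['#']
                  · simp [pvG4, pvG3, pvG2it, pvG2en, pvG1, hA1, pv_tail_eq,
                      show pvItNotes.getD ['l', 'a', '#'] 0 = PySem.Int.mod (9+1) 12 from by decide]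
                  · by_cases hA2 : t.take 1 = ['b']
                    · simp [pvG4, pvG3, pvG2it, pvG2en, pvG1, hA1, hA2, pv_tail_eq,
                        show pvItNotes.getD ['l', 'a', 'b'] 0 = PySem.Int.mod (9-1) 12 from by decide]
                    · simp [pvG4, pvG3, pvG2it, pvG2en, pvG1, hA1, hA2, pv_tail_eq,
                        show pvItNotes.getD ['l', 'a'] 0 = 9 from by decide]
                · 
                  simp [pvG4, pvG3, pvG2it, pvG2en, pvG1, hbl]
              · 
                by_cases hcE : a = 'c'
                · subst hcE
                  by_cases hE1 : b = '#'
                  · subst hE1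
                    simp [pvG4, pvG3, pvG2it, pvG2en, pvG1, pv_tail_eq,
                      show pvEnNotes.getD ['c', '#'] 0 = PySem.Int.mod (0+1) 12 from by decide]
                  · by_cases hE2 : b = 'b'
                    · subst hE2
                      simp [pvG4, pvG3, pvG2it, pvG2en, pvG1, pv_tail_eq,
                        show pvEnNotes.getD ['c', 'b'] 0 = PySem.Int.mod (0-1) 12 from by decide]
                    · simp [pvG4, pvG3, pvG2it, pvG2en, pvG1, hE1, hE2, pv_tail_eq,
                        show pvEnNotes.getD ['c'] 0 = 0 from by decide]
                · 
                  by_cases heE : a = 'e'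
                  · subst heE
                    by_cases hE1 : b = '#'
                    · subst hE1
                      simp [pvG4, pvG3, pvG2it, pvG2en, pvG1, pv_tail_eq,
                        show pvEnNotes.getD ['e', '#'] 0 = PySem.Int.mod (4+1) 12 from by decide]
                    · by_cases hE2 : b = 'b'
                      · subst hE2
                        simp [pvG4, pvG3, pvG2it, pvG2en, pvG1, pv_tail_eq,
                          show pvEnNotes.getD ['e', 'b'] 0 = PySem.Int.mod (4-1) 12 from by decide]
                      · simp [pvG4, pvG3, pvG2it, pvG2en, pvG1, hE1, hE2, pv_tail_eq,
                          show pvEnNotes.getD ['e'] 0 = 4 from by decide]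
                  · 
                    by_cases hgE : a = 'g'
                    · subst hgE
                      by_cases hE1 : b = '#'
                      · subst hE1
                        simp [pvG4, pvG3, pvG2it, pvG2en, pvG1, pv_tail_eq,
                          show pvEnNotes.getD ['g', '#'] 0 = PySem.Int.mod (7+1) 12 from by decide]
                      · by_cases hE2 : b = 'b'
                        · subst hE2
                          simp [pvG4, pvG3, pvG2it, pvG2en, pvG1, pv_tail_eq,
                            show pvEnNotes.getD ['g', 'b'] 0 = PySem.Int.mod (7-1) 12 from by decide]
                        · simp [pvG4, pvG3, pvG2it, pvG2en, pvG1, hE1, hE2, pv_tail_eq,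
                            show pvEnNotes.getD ['g'] 0 = 7 from by decide]
                    · 
                      by_cases haE : a = 'a'
                      · subst haE
                        by_cases hE1 : b = '#'
                        · subst hE1
                          simp [pvG4, pvG3, pvG2it, pvG2en, pvG1, pv_tail_eq,
                            show pvEnNotes.getD ['a', '#'] 0 = PySem.Int.mod (9+1) 12 from by decide]
                        · by_cases hE2 : b = 'b'
                          · subst hE2
                            simp [pvG4, pvG3, pvG2it, pvG2en, pvG1, pv_tail_eq,
                              show pvEnNotes.getD ['a', 'b'] 0 = PySem.Int.mod (9-1) 12 from by decide]
                          · simp [pvG4, pvG3, pvG2it, pvG2en, pvG1, hE1, hE2, pv_tail_eq,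
                              show pvEnNotes.getD ['a'] 0 = 9 from by decide]
                      · 
                        by_cases hbE : a = 'b'
                        · subst hbE
                          by_cases hE1 : b = '#'
                          · subst hE1
                            simp [pvG4, pvG3, pvG2it, pvG2en, pvG1, pv_tail_eq,
                              show pvEnNotes.getD ['b', '#'] 0 = PySem.Int.mod (11+1) 12 from by decide]
                          · by_cases hE2 : b = 'b'
                            · subst hE2
                              simp [pvG4, pvG3, pvG2it, pvG2en, pvG1, pv_tail_eq,
                                show pvEnNotes.getD ['b', 'b'] 0 = PySem.Int.mod (11-1) 12 from by decide]
                            · simp [pvG4, pvG3, pvG2it, pvG2en, pvG1, hE1, hE2, pv_tail_eq,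
                                show pvEnNotes.getD ['b'] 0 = 11 from by decide]
                        · 
                          by_cases hhE : a = 'h'
                          · subst hhE
                            simp [pvG4, pvG3, pvG2it, pvG2en, pvG1, pv_tail_eq, show pvEnNotes.getD ['h'] 0 = 11 from by decide]
                          · 
                            simp [pvG4, pvG3, pvG2it, pvG2en, pvG1, hs, hd, hr, hm, hf, hl, hcE, heE, hgE, haE, hbE, hhE]

-- ===== VERDICT (by name: the statement is the Claim_ definition above) =====
theorem parse_chord_semitones_py_spec : Claim_equal_parse_chord_semitones_py := by
  intro chord_str _
  unfold Spec_parse_chord_semitones_py parse_chord_semitones_py parse_chord_semitones_py_alt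
  exact pv_root_main (PySem.Chars.strip chord_str.toList)
    (PySem.Chars.lower (PySem.Chars.strip chord_str.toList))
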